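-- pv_equiv track=rewrite | github.com/dokabi-recon67/cipherstation | classical_ciphers.py | diagonal_decode
-- ===== SOURCE A (Python) =====
-- def diagonal_decode(ciphertext, width):
--     # Fill grid row-wise
--     text = ''.join(c for c in ciphertext if c.isalpha())
--     if width < 2 or width > len(text)//2:
--         return ciphertext
--     height = (len(text) + width - 1) // width
--     grid = [['']*width for _ in range(height)]
--     idx = 0
--     for r in range(height):
--         for c in range(width):
--             if idx < len(text):
--                 grid[r][c] = text[idx]
--                 idx += 1
--     # Diagonal read
--     result = []
--     for d in range(width + height - 1):
--         for r in range(height):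
--             c = d - r
--             if 0 <= c < width and grid[r][c]:
--                 result.append(grid[r][c])
--     return ''.join(result)
-- ===== SOURCE B (Python) =====
-- def diagonal_decode(ciphertext, width):
--     text = ''.join(c for c in ciphertext if c.isalpha())
--     if width < 2 or width > len(text) // 2:
--         return ciphertext
--     items = []
--     for idx, ch in enumerate(text):
--         r, c = divmod(idx, width)
--         items.append((r + c, r, ch))
--     items.sort(key=lambda t: (t[0], t[1]))
--     return ''.join(t[2] for t in items)
-- ===== Notes on version B (the rewrite author's own statement) =====
-- stated objective: alternative
-- what changed: B replaces A's row-filled grid and nested diagonal scan by computing each character's (diagonal, row) key with divmod and sorting the keyed characters once, keeping A's alpha filter and width guard.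
import Mathlib
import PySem

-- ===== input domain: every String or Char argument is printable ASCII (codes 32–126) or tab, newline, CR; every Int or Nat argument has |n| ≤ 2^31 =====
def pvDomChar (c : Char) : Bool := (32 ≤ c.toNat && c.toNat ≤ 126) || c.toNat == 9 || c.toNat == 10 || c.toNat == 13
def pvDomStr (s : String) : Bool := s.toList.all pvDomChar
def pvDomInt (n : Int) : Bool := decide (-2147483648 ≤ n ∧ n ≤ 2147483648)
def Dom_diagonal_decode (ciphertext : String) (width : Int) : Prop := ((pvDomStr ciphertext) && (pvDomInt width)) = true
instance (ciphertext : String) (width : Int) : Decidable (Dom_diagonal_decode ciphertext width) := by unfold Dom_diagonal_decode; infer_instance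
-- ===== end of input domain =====

-- B replaces A's grid construction and diagonal scan by indexing each character with its
-- (diagonal, row) key and sorting once (objective: alternative decomposition, same result).

-- ===== PORT A =====
-- Python list assignment 'xs[i] = v'; exact for the 0 ≤ i < len xs indices this port performs
def pvListSet {α : Type} (xs : List α) (i : Int) (v : α) : List α := xs.set i.toNat v

def diagonal_decode (ciphertext : String) (width : Int) : String :=
  let text := ciphertext.toList.filter (fun c => PySem.Chars.isalpha c)
  if width < 2 ∨ PySem.Int.floordiv (text.length : Int) 2 < width then ciphertext
  else
    let height := PySem.Int.floordiv ((text.length : Int) + width - 1) width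
    let grid0 := (PySem.List.pyRange 0 height).map (fun _ => PySem.List.pyRepeat [([] : List Char)] width)
    let st := (PySem.List.pyRange 0 height).foldl
      (fun st r => (PySem.List.pyRange 0 width).foldl
        (fun st c =>
          if st.2 < (text.length : Int) then
            (pvListSet st.1 r (pvListSet (PySem.List.pyGetD st.1 r []) c [PySem.List.pyGetD text st.2 ' ']), st.2 + 1)
          else st) st) (grid0, (0 : Int))
    let result := (PySem.List.pyRange 0 (width + height - 1)).foldl
      (fun acc d => (PySem.List.pyRange 0 height).foldl
        (fun acc r =>
          let c := d - r
          if 0 ≤ c ∧ c < width ∧ PySem.List.pyGetD (PySem.List.pyGetD st.1 r []) c [] ≠ [] then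
            acc ++ [PySem.List.pyGetD (PySem.List.pyGetD st.1 r []) c []]
          else acc) acc) []
    String.ofList (PySem.Chars.join [] result)

-- ===== PORT B =====
def diagonal_decode_alt (ciphertext : String) (width : Int) : String :=
  let text := ciphertext.toList.filter (fun c => PySem.Chars.isalpha c)
  if width < 2 ∨ PySem.Int.floordiv (text.length : Int) 2 < width then ciphertext
  else
    let items := (PySem.List.enumerate text).map (fun p =>
      (PySem.Int.floordiv p.1 width + PySem.Int.mod p.1 width, PySem.Int.floordiv p.1 width, p.2))
    let sortedItems := PySem.List.sorted2 items (fun t => t.1) (fun t => t.2.1)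
    String.ofList (PySem.Chars.join [] (sortedItems.map (fun t => [t.2.2])))

-- ===== PRECONDITION & SPEC =====
def Spec_diagonal_decode (ciphertext : String) (width : Int) (out : String) : Prop := out = diagonal_decode_alt ciphertext width
instance (ciphertext : String) (width : Int) (out : String) : Decidable (Spec_diagonal_decode ciphertext width out) := by unfold Spec_diagonal_decode; infer_instance

-- ===== CLAIM (what is proved, stated in full; the proofs are below) =====
def Claim_equal_diagonal_decode : Prop := ∀ (ciphertext : String) (width : Int), Dom_diagonal_decode ciphertext width → Spec_diagonal_decode ciphertext width (diagonal_decode ciphertext width)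

-- ===== LEMMAS AND PROOFS =====

-- the final content of cell (r, c) of A's grid
def gcell (t : List Char) (w r c : Nat) : List Char :=
  if r*w+c < t.length then [t.getD (r*w+c) ' '] else []

def emptyRow (w : Nat) : List (List Char) := (List.range w).map (fun _ => [])

-- row r after its first j cells have been visited with running index starting at idx0
def rowUpTo (t : List Char) (w idx0 j : Nat) : List (List Char) :=
  (List.range w).map (fun c => if c < j ∧ idx0 + c < t.length then [t.getD (idx0+c) ' '] else [])

-- A's grid after its first k rows have been filled
def gridAt (t : List Char) (w h k : Nat) : List (List (List Char)) :=
  (List.range h).map (fun r => if r < k then (List.range w).map (fun c => gcell t w r c) else emptyRow w)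

-- the rows contributing to diagonal d, in ascending order
def colsOf (t : List Char) (w h d : Nat) : List Nat :=
  (List.range h).filter (fun r => decide (r ≤ d ∧ d - r < w ∧ r*w + (d-r) < t.length))

-- the (diagonal, row, char) triples in A's emission order
def SList (t : List Char) (w h : Nat) : List (Int × Int × Char) :=
  (List.range (w+h-1)).flatMap (fun (d : Nat) =>
    (colsOf t w h d).map (fun (r : Nat) => ((d:Int), (r:Int), t.getD (r*w+(d-r)) ' ')))

def itemOf (t : List Char) (w : Nat) (i : Nat) : Int × Int × Char :=
  (((i/w : Nat) : Int) + ((i%w : Nat) : Int), ((i/w : Nat) : Int), t.getD i ' ')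

lemma getD_set_self {α : Type} (g : List α) (r : Nat) (v d : α) (hr : r < g.length) :
    (g.set r v).getD r d = v := by
  simp [List.getD_eq_getElem?_getD, hr]

lemma rowUpTo_zero (t : List Char) (w idx0 : Nat) : rowUpTo t w idx0 0 = emptyRow w := by
  simp [rowUpTo, emptyRow]

lemma rowUpTo_succ_lt (t : List Char) (w idx0 j : Nat) (hj : j < w) (hlt : idx0 + j < t.length) :
    (rowUpTo t w idx0 j).set j [t.getD (idx0+j) ' '] = rowUpTo t w idx0 (j+1) := by
  unfold rowUpTo
  apply List.ext_getElem
  · simp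
  intro i h1 h2
  simp only [List.length_set, List.length_map, List.length_range] at h1
  by_cases hij : i = j
  · subst hij
    rw [List.getElem_set_self]
    simp [hlt]
  · rw [List.getElem_set_ne (by omega)]
    simp only [List.getElem_map, List.getElem_range]
    have : i < j ↔ i < j + 1 := by omega
    simp [this]

lemma rowUpTo_succ_ge (t : List Char) (w idx0 j : Nat) (hge : t.length ≤ idx0 + j) :
    rowUpTo t w idx0 j = rowUpTo t w idx0 (j+1) := by
  unfold rowUpTo
  apply List.map_congr_left
  intro c _
  have : (c < j ∧ idx0 + c < t.length) ↔ (c < j+1 ∧ idx0 + c < t.length) := by omega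
  simp [this]

lemma rowUpTo_full (t : List Char) (w r : Nat) :
    rowUpTo t w (min (r*w) t.length) w = (List.range w).map (fun c => gcell t w r c) := by
  unfold rowUpTo gcell
  apply List.map_congr_left
  intro c hc
  rw [List.mem_range] at hc
  by_cases hle : r*w ≤ t.length
  · rw [min_eq_left hle]
    simp [hc]
  · rw [min_eq_right (by omega)]
    have h1 : ¬ (t.length + c < t.length) := by omega
    have h2 : ¬ (r*w + c < t.length) := by omega
    simp [h1, h2]

lemma fill_row (t : List Char) (w : Nat) (g : List (List (List Char))) (r : Nat)
    (hr : r < g.length) (idx0 : Nat) :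
    ∀ j : Nat, j ≤ w →
    (PySem.List.pyRange (j:Int) (w:Int)).foldl
      (fun st c =>
        if st.2 < (t.length : Int) then
          (pvListSet st.1 (r:Int) (pvListSet (PySem.List.pyGetD st.1 (r:Int) []) c [PySem.List.pyGetD t st.2 ' ']), st.2 + 1)
        else st)
      (g.set r (rowUpTo t w idx0 j), ((min (idx0 + j) t.length : Nat) : Int))
    = (g.set r (rowUpTo t w idx0 w), ((min (idx0 + w) t.length : Nat) : Int)) := by
  suffices H : ∀ k j, j ≤ w → w - j = k →
      (PySem.List.pyRange (j:Int) (w:Int)).foldl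
        (fun st c =>
          if st.2 < (t.length : Int) then
            (pvListSet st.1 (r:Int) (pvListSet (PySem.List.pyGetD st.1 (r:Int) []) c [PySem.List.pyGetD t st.2 ' ']), st.2 + 1)
          else st)
        (g.set r (rowUpTo t w idx0 j), ((min (idx0 + j) t.length : Nat) : Int))
      = (g.set r (rowUpTo t w idx0 w), ((min (idx0 + w) t.length : Nat) : Int)) by
    intro j hj; exact H (w-j) j hj rfl
  intro k
  induction k with
  | zero =>
    intro j hj hk
    have hjw : j = w := by omega
    subst hjw
    rw [PySem.List.pyRange_one_eq_nil (le_refl _)]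
    rfl
  | succ k ih =>
    intro j hj hk
    have hjw : j < w := by omega
    rw [PySem.List.pyRange_one_cons (by exact_mod_cast hjw)]
    simp only [List.foldl_cons]
    by_cases hlt : idx0 + j < t.length
    · rw [if_pos (show (((min (idx0+j) t.length : Nat)):Int) < (t.length:Int) by push_cast; omega)]
      have e1 : PySem.List.pyGetD (g.set r (rowUpTo t w idx0 j)) (r:Int) [] = rowUpTo t w idx0 j := by
        rw [PySem.List.pyGetD_natCast]; exact getD_set_self _ _ _ _ hr
      rw [e1]
      have e2 : PySem.List.pyGetD t ((min (idx0+j) t.length : Nat):Int) ' ' = t.getD (idx0+j) ' ' := by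
        rw [PySem.List.pyGetD_natCast]; congr 1; omega
      rw [e2]
      unfold pvListSet
      simp only [Int.toNat_natCast]
      rw [rowUpTo_succ_lt t w idx0 j hjw hlt]
      rw [List.set_set]
      have e3 : ((min (idx0+j) t.length:Nat):Int) + 1 = ((min (idx0+(j+1)) t.length:Nat):Int) := by push_cast; omega
      rw [e3]
      have := ih (j+1) (by omega) (by omega)
      push_cast at this ⊢
      exact this
    · rw [if_neg (show ¬ ((((min (idx0+j) t.length : Nat)):Int) < (t.length:Int)) by push_cast; omega)]
      have e4 : rowUpTo t w idx0 j = rowUpTo t w idx0 (j+1) := rowUpTo_succ_ge _ _ _ _ (by omega)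
      have e5 : ((min (idx0+j) t.length:Nat):Int) = ((min (idx0+(j+1)) t.length:Nat):Int) := by push_cast; omega
      rw [e4, e5]
      have := ih (j+1) (by omega) (by omega)
      push_cast at this ⊢
      exact this

lemma gridAt_set_empty (t : List Char) (w h k : Nat) (hk : k < h) :
    (gridAt t w h k).set k (emptyRow w) = gridAt t w h k := by
  apply List.ext_getElem
  · simp
  intro i h1 h2
  by_cases hik : i = k
  · subst hik
    rw [List.getElem_set_self]
    unfold gridAt
    simp
  · rw [List.getElem_set_ne (by omega)]

lemma gridAt_set (t : List Char) (w h k : Nat) (hk : k < h) :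
    (gridAt t w h k).set k ((List.range w).map (fun c => gcell t w k c)) = gridAt t w h (k+1) := by
  unfold gridAt
  apply List.ext_getElem
  · simp
  intro i h1 h2
  simp only [List.length_set, List.length_map, List.length_range] at h1
  by_cases hik : i = k
  · subst hik
    rw [List.getElem_set_self]
    simp
  · rw [List.getElem_set_ne (by omega)]
    simp only [List.getElem_map, List.getElem_range]
    have : i < k ↔ i < k + 1 := by omega
    simp [this]

lemma fill_grid (t : List Char) (w h : Nat) (hw : 0 < w) :
    ∀ k : Nat, k ≤ h →
    (PySem.List.pyRange (k:Int) (h:Int)).foldl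
      (fun st r => (PySem.List.pyRange 0 (w:Int)).foldl
        (fun st c =>
          if st.2 < (t.length : Int) then
            (pvListSet st.1 r (pvListSet (PySem.List.pyGetD st.1 r []) c [PySem.List.pyGetD t st.2 ' ']), st.2 + 1)
          else st) st)
      (gridAt t w h k, ((min (k*w) t.length : Nat) : Int))
    = (gridAt t w h h, ((min (h*w) t.length : Nat) : Int)) := by
  suffices H : ∀ m k, k ≤ h → h - k = m →
      (PySem.List.pyRange (k:Int) (h:Int)).foldl
        (fun st r => (PySem.List.pyRange 0 (w:Int)).foldl
          (fun st c =>
            if st.2 < (t.length : Int) then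
              (pvListSet st.1 r (pvListSet (PySem.List.pyGetD st.1 r []) c [PySem.List.pyGetD t st.2 ' ']), st.2 + 1)
            else st) st)
        (gridAt t w h k, ((min (k*w) t.length : Nat) : Int))
      = (gridAt t w h h, ((min (h*w) t.length : Nat) : Int)) by
    intro k hk; exact H (h-k) k hk rfl
  intro m
  induction m with
  | zero =>
    intro k hk hm
    have : k = h := by omega
    subst this
    rw [PySem.List.pyRange_one_eq_nil (le_refl _)]
    rfl
  | succ m ih =>
    intro k hk hm
    have hkh : k < h := by omega
    rw [PySem.List.pyRange_one_cons (a := (k:Int)) (b := (h:Int)) (by exact_mod_cast hkh)]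
    simp only [List.foldl_cons]
    have hstart : (gridAt t w h k, ((min (k*w) t.length : Nat) : Int))
        = ((gridAt t w h k).set k (rowUpTo t w (min (k*w) t.length) 0), ((min (min (k*w) t.length + 0) t.length : Nat) : Int)) := by
      rw [rowUpTo_zero, gridAt_set_empty t w h k hkh]
      congr 2
      omega
    rw [hstart]
    have hfr := fill_row t w (gridAt t w h k) k (by simp [gridAt, hkh]) (min (k*w) t.length) 0 (by omega)
    simp only [Nat.cast_zero] at hfr
    rw [hfr]
    rw [rowUpTo_full, gridAt_set t w h k hkh]
    have eN : (min (min (k*w) t.length + w) t.length : Nat) = (min ((k+1)*w) t.length : Nat) := by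
      have : (k+1)*w = k*w + w := by ring
      omega
    have e : ((min (min (k*w) t.length + w) t.length : Nat) : Int) = ((min ((k+1)*w) t.length : Nat) : Int) :=
      congrArg _ eN
    rw [e]
    have := ih (k+1) (by omega) (by omega)
    push_cast at this ⊢
    exact this

lemma grid_get (t : List Char) (w h r c : Nat) (hr : r < h) (hc : c < w) :
    PySem.List.pyGetD (PySem.List.pyGetD (gridAt t w h h) (r:Int) []) (c:Int) [] = gcell t w r c := by
  rw [PySem.List.pyGetD_natCast, PySem.List.pyGetD_natCast]
  unfold gridAt
  rw [PySem.List.getD_map_range _ _ _ _ hr]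
  rw [if_pos hr]
  rw [PySem.List.getD_map_range _ _ _ _ hc]

lemma A_read (t : List Char) (w h : Nat) (hw : 0 < w) :
    (PySem.List.pyRange 0 ((w:Int) + (h:Int) - 1)).foldl
      (fun acc d => (PySem.List.pyRange 0 (h:Int)).foldl
        (fun acc r =>
          if 0 ≤ d - r ∧ d - r < (w:Int) ∧ PySem.List.pyGetD (PySem.List.pyGetD (gridAt t w h h) r []) (d - r) [] ≠ [] then
            acc ++ [PySem.List.pyGetD (PySem.List.pyGetD (gridAt t w h h) r []) (d - r) []]
          else acc) acc) ([] : List (List Char))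
    = (SList t w h).map (fun x => [x.2.2]) := by
  have houter : ∀ (acc : List (List Char)), ∀ d ∈ PySem.List.pyRange 0 ((w:Int) + (h:Int) - 1),
      (PySem.List.pyRange 0 (h:Int)).foldl
        (fun acc r =>
          if 0 ≤ d - r ∧ d - r < (w:Int) ∧ PySem.List.pyGetD (PySem.List.pyGetD (gridAt t w h h) r []) (d - r) [] ≠ [] then
            acc ++ [PySem.List.pyGetD (PySem.List.pyGetD (gridAt t w h h) r []) (d - r) []]
          else acc) acc
      = acc ++ ((PySem.List.pyRange 0 (h:Int)).filter
          (fun r => decide (0 ≤ d - r ∧ d - r < (w:Int) ∧ PySem.List.pyGetD (PySem.List.pyGetD (gridAt t w h h) r []) (d - r) [] ≠ []))).map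
          (fun r => PySem.List.pyGetD (PySem.List.pyGetD (gridAt t w h h) r []) (d - r) []) := by
    intro acc d _
    exact PySem.List.foldl_append_ite _ _ _ _
  rw [PySem.List.foldl_congr_mem _ _ _ _ houter]
  rw [PySem.List.foldl_append_eq_flatMap]
  rw [List.nil_append]
  have hcast : (w:Int) + (h:Int) - 1 = ((w + h - 1 : Nat) : Int) := by omega
  rw [hcast, PySem.List.pyRange_zero_natCast (w+h-1), PySem.List.pyRange_zero_natCast h, List.flatMap_map]
  unfold SList
  rw [List.map_flatMap]
  apply List.flatMap_congr
  intro d hd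
  rw [List.mem_range] at hd
  rw [List.filter_map, List.map_map]
  have hfc : ∀ r ∈ List.range h,
      ((fun r => decide (0 ≤ (d:Int) - r ∧ (d:Int) - r < (w:Int) ∧ PySem.List.pyGetD (PySem.List.pyGetD (gridAt t w h h) r []) ((d:Int) - r) [] ≠ [])) ∘ (fun (k:Nat) => (k:Int))) r
      = (fun r => decide (r ≤ d ∧ d - r < w ∧ r*w + (d-r) < t.length)) r := by
    intro r hr
    rw [List.mem_range] at hr
    simp only [Function.comp_apply]
    apply decide_eq_decide.mpr
    constructor
    · rintro ⟨h1, h2, h3⟩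
      have hrd : r ≤ d := by omega
      have hcw : d - r < w := by omega
      refine ⟨hrd, hcw, ?_⟩
      rw [show (d:Int) - (r:Int) = ((d - r : Nat) : Int) by omega] at h3
      rw [grid_get t w h r (d-r) hr hcw] at h3
      unfold gcell at h3
      by_contra hcon
      simp [hcon] at h3
    · rintro ⟨h1, h2, h3⟩
      refine ⟨by omega, by omega, ?_⟩
      rw [show (d:Int) - (r:Int) = ((d - r : Nat) : Int) by omega]
      rw [grid_get t w h r (d-r) hr h2]
      unfold gcell
      simp [h3]
  rw [List.filter_congr hfc]
  show _ = ((colsOf t w h d).map _).map _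
  rw [List.map_map]
  unfold colsOf
  apply List.map_congr_left
  intro r hrmem
  rw [List.mem_filter, List.mem_range] at hrmem
  obtain ⟨hr, hq⟩ := hrmem
  rw [decide_eq_true_iff] at hq
  obtain ⟨h1, h2, h3⟩ := hq
  simp only [Function.comp_apply]
  rw [show (d:Int) - (r:Int) = ((d - r : Nat) : Int) by omega]
  rw [grid_get t w h r (d-r) hr h2]
  unfold gcell
  simp [h3]


lemma mem_SList_iff (t : List Char) (w h : Nat) (hw : 0 < w) (hhw : t.length ≤ h*w)
    (x : Int × Int × Char) :
    x ∈ SList t w h ↔ x ∈ (List.range t.length).map (itemOf t w) := by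
  simp only [SList, colsOf, itemOf, List.mem_flatMap, List.mem_map, List.mem_filter,
    List.mem_range, decide_eq_true_iff]
  constructor
  · rintro ⟨d, hd, r, ⟨⟨hr, h1, h2, h3⟩, rfl⟩⟩
    refine ⟨r*w + (d-r), h3, ?_⟩
    have hdiv : (r*w + (d-r))/w = r := by
      rw [Nat.add_comm, Nat.add_mul_div_right _ _ hw, Nat.div_eq_of_lt h2]
      exact Nat.zero_add r
    have hmod : (r*w + (d-r))%w = d - r := by
      rw [Nat.add_comm, Nat.add_mul_mod_self_right, Nat.mod_eq_of_lt h2]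
    rw [hdiv, hmod]
    have : ((r:Int)) + ((d-r : Nat):Int) = (d:Int) := by omega
    rw [this]
  · rintro ⟨i, hi, rfl⟩
    have hc : i % w < w := Nat.mod_lt _ hw
    have hi2 : i/w * w + i%w = i := by rw [Nat.mul_comm]; exact Nat.div_add_mod i w
    have hmul : i/w * w ≤ i := Nat.div_mul_le_self i w
    have hrh : i/w < h := by
      by_contra hcon
      have h5 : h * w ≤ i/w * w := Nat.mul_le_mul_right _ (by omega)
      omega
    have e1 : i/w + i%w - i/w = i%w := by omega
    refine ⟨i/w + i%w, by omega, i/w, ⟨⟨hrh, by omega, by omega, by omega⟩, ?_⟩⟩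
    rw [e1, hi2]
    have : ((i/w + i%w : Nat) : Int) = ((i/w : Nat) : Int) + ((i%w : Nat):Int) := by push_cast; ring
    rw [this]

lemma SList_pairwise (t : List Char) (w h : Nat) :
    (SList t w h).Pairwise (fun a b => (toLex (a.1, a.2.1) : Lex (Int × Int)) < toLex (b.1, b.2.1)) := by
  unfold SList
  rw [List.flatMap_def, List.pairwise_flatten]
  constructor
  · intro l hl
    rw [List.mem_map] at hl
    obtain ⟨d, hd, rfl⟩ := hl
    rw [List.pairwise_map]
    have : (colsOf t w h d).Pairwise (· < ·) := by
      apply List.Pairwise.filter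
      exact List.pairwise_lt_range
    apply this.imp
    intro a b hab
    simp only [Prod.Lex.lt_iff, ofLex_toLex]
    right
    exact ⟨trivial, by exact_mod_cast hab⟩
  · have : (List.range (w+h-1)).Pairwise (· < ·) := List.pairwise_lt_range
    rw [List.pairwise_map]
    apply this.imp
    intro d1 d2 hd x hx y hy
    rw [List.mem_map] at hx hy
    obtain ⟨r1, _, rfl⟩ := hx
    obtain ⟨r2, _, rfl⟩ := hy
    simp only [Prod.Lex.lt_iff, ofLex_toLex]
    left
    exact_mod_cast hd

lemma items_nodup (t : List Char) (w : Nat) :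
    ((List.range t.length).map (itemOf t w)).Nodup := by
  apply List.Nodup.map_on _ List.nodup_range
  intro i _ j _ hij
  unfold itemOf at hij
  rw [Prod.mk.injEq, Prod.mk.injEq] at hij
  obtain ⟨h1, h2, _⟩ := hij
  have e1 : i/w = j/w := by exact_mod_cast h2
  have e2 : i%w = j%w := by omega
  have d1 : w * (i/w) + i%w = i := Nat.div_add_mod i w
  have d2 : w * (j/w) + j%w = j := Nat.div_add_mod j w
  rw [e1] at d1
  omega

lemma sorted2_eq_sorted_lex {α : Type} (xs : List α) (k1 k2 : α → Int) :
    PySem.List.sorted2 xs k1 k2 = PySem.List.sorted xs (fun a => (toLex (k1 a, k2 a) : Lex (Int × Int))) := by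
  have hbef : (fun a b => decide (k1 a < k1 b) || (!decide (k1 b < k1 a) && decide (k2 a < k2 b)))
      = (fun a b => decide ((toLex (k1 a, k2 a) : Lex (Int × Int)) < toLex (k1 b, k2 b))) := by
    funext a b
    rw [Bool.eq_iff_iff]
    simp only [Bool.or_eq_true, Bool.and_eq_true, Bool.not_eq_true', decide_eq_true_iff,
      decide_eq_false_iff_not, Prod.Lex.lt_iff, ofLex_toLex]
    constructor
    · rintro (hlt | ⟨hnl, hk2⟩)
      · left; exact hlt
      · rcases lt_trichotomy (k1 a) (k1 b) with hl | he | hg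
        · left; exact hl
        · right; exact ⟨he, hk2⟩
        · exact absurd hg hnl
    · rintro (hlt | ⟨he, hk2⟩)
      · left; exact hlt
      · right; exact ⟨by omega, hk2⟩
  unfold PySem.List.sorted2 PySem.List.sorted
  rw [hbef]

lemma B_sorted (t : List Char) (w h : Nat) (hw : 0 < w) (hhw : t.length ≤ h*w) :
    PySem.List.sorted2 ((List.range t.length).map (itemOf t w)) (fun t => t.1) (fun t => t.2.1)
    = SList t w h := by
  rw [sorted2_eq_sorted_lex]
  apply PySem.List.sorted_eq_of_perm_of_pairwise_lt
  · rw [List.perm_ext_iff_of_nodup _ (items_nodup t w)]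
    · exact mem_SList_iff t w h hw hhw
    · exact ((SList_pairwise t w h).imp (fun {a b} hab => by
        intro he
        rw [he] at hab
        exact absurd hab (lt_irrefl _)))
  · exact SList_pairwise t w h

-- ===== VERDICT (by name: the statement is the Claim_ definition above) =====
lemma len_to_length (t : List Char) : PySem.List.len t = (t.length : Int) := by
  simp [pysem]

theorem diagonal_decode_spec : Claim_equal_diagonal_decode := by
  unfold Claim_equal_diagonal_decode
  intro ciphertext width _
  unfold Spec_diagonal_decode diagonal_decode diagonal_decode_alt
  set t := ciphertext.toList.filter (fun c => PySem.Chars.isalpha c) with ht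
  by_cases hg : width < 2 ∨ PySem.Int.floordiv (t.length : Int) 2 < width
  · simp only [if_pos hg]
  · simp only [if_neg hg]
    push Not at hg
    obtain ⟨hw2, hwn⟩ := hg
    set n := t.length with hn
    obtain ⟨w, rfl⟩ : ∃ w : Nat, width = (w:Int) := ⟨width.toNat, (Int.toNat_of_nonneg (by omega)).symm⟩
    have hfd : PySem.Int.floordiv (n:Int) 2 = ((n/2 : Nat):Int) := by
      exact_mod_cast PySem.Int.floordiv_natCast n 2
    rw [hfd] at hwn
    have hw2' : 2 ≤ w := by exact_mod_cast hw2
    have hwn' : w ≤ n/2 := by exact_mod_cast hwn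
    have hw0 : 0 < w := by omega
    have hh : PySem.Int.floordiv ((n:Int) + (w:Int) - 1) (w:Int) = (((n + w - 1)/w : Nat):Int) := by
      rw [show (n:Int) + (w:Int) - 1 = ((n + w - 1 : Nat):Int) by omega]
      exact_mod_cast PySem.Int.floordiv_natCast (n+w-1) w
    rw [hh]
    set h := (n + w - 1)/w with hdefh
    have hnh : n ≤ h*w := by
      have hdm := Nat.div_add_mod (n+w-1) w
      have hmlt : (n+w-1)%w < w := Nat.mod_lt _ hw0
      have e : h*w = w*((n+w-1)/w) := by rw [hdefh, Nat.mul_comm]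
      omega
    have hgrid0 : ((PySem.List.pyRange 0 (h:Int)).map (fun _ => PySem.List.pyRepeat [([]:List Char)] (w:Int)))
        = gridAt t w h 0 := by
      rw [PySem.List.pyRange_zero_natCast, List.map_map]
      unfold gridAt emptyRow
      simp [PySem.List.pyRepeat_singleton, List.map_const']
      simp [Function.comp_def, List.map_const']
    rw [hgrid0]
    have hfill := fill_grid t w h hw0 0 (Nat.zero_le h)
    simp only [Nat.zero_mul, Nat.zero_min, Nat.cast_zero] at hfill
    rw [hfill]
    rw [A_read t w h hw0]
    have hitems : ((PySem.List.enumerate t).map (fun p =>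
        (PySem.Int.floordiv p.1 (w:Int) + PySem.Int.mod p.1 (w:Int), PySem.Int.floordiv p.1 (w:Int), p.2)))
        = (List.range n).map (itemOf t w) := by
      rw [PySem.List.enumerate_eq_map_pyRange t ' ', len_to_length t, ← hn,
        PySem.List.pyRange_zero_natCast, List.map_map, List.map_map]
      apply List.map_congr_left
      intro i hi
      simp only [Function.comp_apply, PySem.List.pyGetD_natCast, PySem.Int.floordiv_natCast,
        PySem.Int.mod_natCast]
      rfl
    rw [hitems, B_sorted t w h hw0 hnh]
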